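-- pv_equiv track=rewrite | github.com/DudinovaOksana/Udemy_Python | 4_hw4.py | any_duplicates
-- ===== SOURCE A (Python) =====
-- def any_duplicates(square):
--     available_numbers = [1, 2, 3, 4, 5, 6, 7, 8, 9]
--     for row in square:
--         for number in row:
--             try:
--                 available_numbers.remove(number)
--             except ValueError:
--                 return True
--     return False
-- ===== SOURCE B (Python) =====
-- def any_duplicates(square):
--     nums = [n for row in square for n in row]
--     return len(nums) != len(set(nums)) or any(n not in range(1, 10) for n in nums)
-- ===== Notes on version B (the rewrite author's own statement) =====
-- stated objective: simpler
-- what changed: Replaces the stateful element-by-element .remove loop over a shrinking availability list (with ValueError as control flow) by flattening the square once and checking it with a set-length duplicate test plus a range membership test.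
import Mathlib
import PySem

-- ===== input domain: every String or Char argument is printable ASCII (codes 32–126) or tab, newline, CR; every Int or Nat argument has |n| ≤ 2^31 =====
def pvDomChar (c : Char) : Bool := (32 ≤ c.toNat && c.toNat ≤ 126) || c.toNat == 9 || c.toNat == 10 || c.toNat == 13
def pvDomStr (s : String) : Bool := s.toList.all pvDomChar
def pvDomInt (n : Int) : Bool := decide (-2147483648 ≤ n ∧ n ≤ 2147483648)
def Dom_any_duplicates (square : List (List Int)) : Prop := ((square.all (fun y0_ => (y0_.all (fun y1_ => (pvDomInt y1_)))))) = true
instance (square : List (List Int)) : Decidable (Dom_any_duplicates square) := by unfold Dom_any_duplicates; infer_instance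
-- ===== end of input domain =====

-- B flattens the square once and detects a duplicate by comparing the list's length with its set's
-- length, plus a 1..9 range check, instead of A's stateful .remove loop; objective: simpler.


-- ===== PORT A =====
-- inner 'for number in row' loop: none = early 'return True' (ValueError on remove)
def adInner (avail : List Int) (row : List Int) : Option (List Int) :=
  match row with
  | [] => some avail
  | n :: rest =>
    match PySem.List.remove? avail n with
    | none => none
    | some a' => adInner a' rest

-- outer 'for row in square' loop
def adOuter (avail : List Int) (rows : List (List Int)) : Bool :=
  match rows with
  | [] => false
  | r :: rest =>
    match adInner avail r with
    | none => true
    | some a' => adOuter a' rest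

def any_duplicates (square : List (List Int)) : Bool :=
  adOuter [1, 2, 3, 4, 5, 6, 7, 8, 9] square

-- ===== PORT B =====
def any_duplicates_alt (square : List (List Int)) : Bool :=
  let nums := square.flatMap (fun row => row)
  decide (nums.length ≠ (PySem.Set.ofList nums).length)
    || nums.any (fun n => !(decide (1 ≤ n) && decide (n < 10)))

-- ===== PRECONDITION & SPEC =====
def Spec_any_duplicates (square : List (List Int)) (out : Bool) : Prop := out = any_duplicates_alt square
instance (square : List (List Int)) (out : Bool) : Decidable (Spec_any_duplicates square out) := by unfold Spec_any_duplicates; infer_instance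

-- ===== CLAIM (what is proved, stated in full; the proofs are below) =====
def Claim_equal_any_duplicates : Prop := ∀ (square : List (List Int)), Dom_any_duplicates square → Spec_any_duplicates square (any_duplicates square)

-- ===== LEMMAS AND PROOFS =====

lemma adInner_append (xs ys : List Int) : ∀ avail,
    adInner avail (xs ++ ys) = (adInner avail xs).bind (fun a => adInner a ys) := by
  induction xs with
  | nil => intro avail; simp [adInner]
  | cons n rest ih =>
    intro avail
    simp only [List.cons_append, adInner]
    cases PySem.List.remove? avail n with
    | none => rfl
    | some a' => exact ih a'

lemma adOuter_eq_inner (rows : List (List Int)) : ∀ avail,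
    adOuter avail rows = !(adInner avail (rows.flatMap (fun r => r))).isSome := by
  induction rows with
  | nil => intro avail; simp [adOuter, adInner]
  | cons r rest ih =>
    intro avail
    simp only [adOuter, List.flatMap_cons, adInner_append]
    cases h : adInner avail r with
    | none => simp
    | some a' => simpa using ih a'

lemma adInner_isSome (nums : List Int) : ∀ avail : List Int, avail.Nodup →
    ((adInner avail nums).isSome ↔ nums.Nodup ∧ ∀ n ∈ nums, n ∈ avail) := by
  induction nums with
  | nil => intro avail _; simp [adInner]
  | cons n rest ih =>
    intro avail hnd
    by_cases hmem : n ∈ avail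
    · rw [adInner, PySem.List.remove?_eq_some_erase avail n hmem]
      have hnd' : (avail.erase n).Nodup := hnd.erase n
      rw [ih _ hnd']
      constructor
      · rintro ⟨hr, hall⟩
        refine ⟨List.nodup_cons.mpr ⟨?_, hr⟩, ?_⟩
        · intro hcon
          have := (hnd.mem_erase_iff).mp (hall n hcon)
          exact this.1 rfl
        · intro m hm
          rcases List.mem_cons.mp hm with rfl | hm
          · exact hmem
          · exact ((hnd.mem_erase_iff).mp (hall m hm)).2
      · rintro ⟨hnod, hall⟩
        rcases List.nodup_cons.mp hnod with ⟨hnin, hr⟩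
        refine ⟨hr, fun m hm => (hnd.mem_erase_iff).mpr ⟨?_, hall m (.tail _ hm)⟩⟩
        intro he; exact hnin (he ▸ hm)
    · rw [adInner, (PySem.List.remove?_eq_none_iff avail n).mpr hmem]
      simp only [Option.isSome_none, Bool.false_eq_true, false_iff]
      rintro ⟨-, hall⟩
      exact hmem (hall n (.head _))

lemma length_ofList_lt {xs : List Int} (h : ¬ xs.Nodup) :
    (PySem.Set.ofList xs).length < xs.length := by
  induction xs with
  | nil => exact absurd List.nodup_nil h
  | cons x rest ih =>
    rw [PySem.Set.ofList_cons]
    by_cases hmem : x ∈ rest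
    · have hsub : PySem.Set.discard (PySem.Set.ofList rest) x ⊆ (PySem.Set.ofList rest).erase x := by
        intro y hy
        rcases (PySem.Set.mem_discard _ _ _).mp hy with ⟨hy1, hy2⟩
        exact ((PySem.Set.nodup_ofList rest).mem_erase_iff).mpr ⟨hy2, hy1⟩
      have hnd : (PySem.Set.discard (PySem.Set.ofList rest) x).Nodup :=
        PySem.Set.nodup_discard _ x (PySem.Set.nodup_ofList rest)
      have h1 : (PySem.Set.discard (PySem.Set.ofList rest) x).length ≤
          ((PySem.Set.ofList rest).erase x).length := (hnd.subperm hsub).length_le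
      have h2 : ((PySem.Set.ofList rest).erase x).length = (PySem.Set.ofList rest).length - 1 :=
        List.length_erase_of_mem ((PySem.Set.mem_ofList _ _).mpr hmem)
      have h3 : (PySem.Set.ofList rest).length ≤ rest.length := PySem.Set.length_ofList_le rest
      have h4 : 0 < (PySem.Set.ofList rest).length :=
        List.length_pos_of_mem ((PySem.Set.mem_ofList _ _).mpr hmem)
      simp only [List.length_cons]
      omega
    · have hnr : ¬ rest.Nodup := fun hr => h (List.nodup_cons.mpr ⟨hmem, hr⟩)
      have h1 : (PySem.Set.discard (PySem.Set.ofList rest) x).Nodup :=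
        PySem.Set.nodup_discard _ x (PySem.Set.nodup_ofList rest)
      have hsub : PySem.Set.discard (PySem.Set.ofList rest) x ⊆ PySem.Set.ofList rest := by
        intro y hy; exact ((PySem.Set.mem_discard _ _ _).mp hy).1
      have h2 : (PySem.Set.discard (PySem.Set.ofList rest) x).length ≤
          (PySem.Set.ofList rest).length := (h1.subperm hsub).length_le
      have := ih hnr
      simp only [List.length_cons]
      omega

lemma length_ofList_eq_iff (xs : List Int) :
    ((PySem.Set.ofList xs).length = xs.length ↔ xs.Nodup) := by
  constructor
  · intro h
    by_contra hnd
    exact absurd h (Nat.ne_of_lt (length_ofList_lt hnd))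
  · intro h; rw [PySem.Set.ofList_eq_self_of_nodup _ h]

lemma mem_nine (n : Int) : n ∈ ([1, 2, 3, 4, 5, 6, 7, 8, 9] : List Int) ↔ 1 ≤ n ∧ n < 10 := by
  simp only [List.mem_cons, List.not_mem_nil, or_false]
  omega

-- ===== VERDICT (by name: the statement is the Claim_ definition above) =====
theorem any_duplicates_spec : Claim_equal_any_duplicates := by
  intro square _
  unfold Spec_any_duplicates any_duplicates any_duplicates_alt
  have h9 : ([1, 2, 3, 4, 5, 6, 7, 8, 9] : List Int).Nodup := by decide
  rw [adOuter_eq_inner]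
  set nums := square.flatMap (fun r => r) with hn
  have hiff := adInner_isSome nums _ h9
  have key : ∀ a b : Bool, (a = true ↔ b = true) → a = b := by decide
  apply key
  constructor
  · intro h
    have hno : ¬ ((adInner [1, 2, 3, 4, 5, 6, 7, 8, 9] nums).isSome = true) := by simpa using h
    rw [hiff] at hno
    by_cases hd : nums.Nodup
    · have hnall : ¬ ∀ n ∈ nums, n ∈ ([1, 2, 3, 4, 5, 6, 7, 8, 9] : List Int) :=
        fun hall => hno ⟨hd, hall⟩
      push Not at hnall
      obtain ⟨m, hm, hma⟩ := hnall
      rw [mem_nine] at hma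
      rw [Bool.or_eq_true]
      refine Or.inr (List.any_eq_true.mpr ⟨m, hm, ?_⟩)
      revert hma
      simp only [Bool.not_eq_true', Bool.and_eq_false_iff, decide_eq_false_iff_not]
      omega
    · rw [Bool.or_eq_true]
      exact Or.inl (decide_eq_true (fun hlen => hd ((length_ofList_eq_iff nums).mp hlen.symm)))
  · intro h
    have hno : ¬ ((adInner [1, 2, 3, 4, 5, 6, 7, 8, 9] nums).isSome = true) := by
      rw [hiff]
      rintro ⟨hnod, hall⟩
      rw [Bool.or_eq_true] at h
      rcases h with h1 | h2
      · exact (of_decide_eq_true h1) ((length_ofList_eq_iff nums).mpr hnod).symm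
      · obtain ⟨m, hm, hma⟩ := List.any_eq_true.mp h2
        have hmem := (mem_nine m).mp (hall m hm)
        revert hma
        simp only [Bool.not_eq_true', Bool.and_eq_false_iff, decide_eq_false_iff_not]
        omega
    simpa using hno
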